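-- pv_equiv track=rewrite | github.com/HDeBoever/practice | Banners.py | solution
-- ===== SOURCE A (Python) =====
-- def solution(H):
--     # write your code in Python 3.6
--
--     # case 1, 1 banner
--     one_banner_area = max(H)*len(H)
--
--     # case 2, 2 banners
--
--     #start at index 1 to avoid the checking an empty sequence
--     curr_smallest = one_banner_area
--     for i in range(1, len(H)):
--         # use list slicing
--         two_banner_area = (max(H[0:i])*len(H[0:i])) + (max(H[i:])*len(H[i:]))
--
--         if two_banner_area < curr_smallest:
--             curr_smallest = two_banner_area
--
--     if curr_smallest < one_banner_area:
--         return curr_smallest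
--     else:
--         return one_banner_area
--     return 0
-- ===== SOURCE B (Python) =====
-- def solution(H):
--     n = len(H)
--     # suffix running maxima: after the loop, sufs[i] == max(H[i:])
--     sufs = []
--     m = H[-1]
--     for x in reversed(H):
--         if x > m:
--             m = x
--         sufs.append(m)
--     sufs.reverse()
--     best = sufs[0] * n  # one banner
--     pref = H[0]
--     for i in range(1, n):
--         if H[i - 1] > pref:
--             pref = H[i - 1]
--         cand = pref * i + sufs[i] * (n - i)
--         if cand < best:
--             best = cand
--     return best
-- ===== Notes on version B (the rewrite author's own statement) =====
-- stated objective: faster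
-- what changed: Replaces the per-split slicing and re-scanning (max over both slices at every split) with one backward pass building suffix maxima and one forward pass maintaining a running prefix maximum, so each split is evaluated in O(1).
import Mathlib
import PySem

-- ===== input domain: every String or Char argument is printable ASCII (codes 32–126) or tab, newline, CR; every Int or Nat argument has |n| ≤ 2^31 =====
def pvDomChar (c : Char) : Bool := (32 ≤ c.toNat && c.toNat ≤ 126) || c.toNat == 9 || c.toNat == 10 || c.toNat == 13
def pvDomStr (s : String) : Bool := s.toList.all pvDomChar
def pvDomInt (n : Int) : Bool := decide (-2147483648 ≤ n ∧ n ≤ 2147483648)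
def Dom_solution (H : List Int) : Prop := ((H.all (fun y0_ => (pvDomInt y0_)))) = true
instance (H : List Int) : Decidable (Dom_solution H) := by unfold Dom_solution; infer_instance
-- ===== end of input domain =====

-- B replaces A's quadratic slice-and-rescan with suffix-maxima + running prefix maximum (linear); return value proved equal on nonempty lists.

-- ===== PORT A =====
def solution (H : List Int) : Int :=
  match PySem.List.max? H (fun y => y) with
  | none => 0  -- max([]) raises ValueError; excluded by Pre_solution
  | some mx =>
    let n : Int := H.length
    let one_banner_area := mx * n
    let curr_smallest := (PySem.List.pyRange 1 n 1).foldl (fun curr i =>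
      let left := PySem.List.slice H (some 0) (some i)
      let right := PySem.List.slice H (some i) none
      let two := ((PySem.List.max? left (fun y => y)).getD 0) * (left.length : Int)
                 + ((PySem.List.max? right (fun y => y)).getD 0) * (right.length : Int)
      if two < curr then two else curr) one_banner_area
    if curr_smallest < one_banner_area then curr_smallest else one_banner_area

-- ===== PORT B =====
def solution_alt (H : List Int) : Int :=
  match PySem.List.pyGet? H (-1) with
  | none => 0  -- H[-1] raises IndexError; excluded by Pre_solution
  | some lastH =>
    let n : Int := H.length
    let p := H.reverse.foldl (fun (p : List Int × Int) x =>
        let m := if x > p.2 then x else p.2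
        (p.1 ++ [m], m)) ([], lastH)
    let sufs := p.1.reverse
    let best0 := PySem.List.pyGetD sufs 0 0 * n
    let q := (PySem.List.pyRange 1 n 1).foldl (fun (q : Int × Int) i =>
        let hi := PySem.List.pyGetD H (i - 1) 0
        let pref := if hi > q.1 then hi else q.1
        let cand := pref * i + PySem.List.pyGetD sufs i 0 * (n - i)
        (pref, if cand < q.2 then cand else q.2)) (PySem.List.pyGetD H 0 0, best0)
    q.2

-- ===== PRECONDITION & SPEC =====
-- Pre_ excludes only the empty list, on which A raises ValueError (max of empty sequence).
def Pre_solution (H : List Int) : Prop := H ≠ []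
instance (H : List Int) : Decidable (Pre_solution H) := by unfold Pre_solution; infer_instance
def pvWitness_solution : List Int := ([3, 1, 4])

def Spec_solution (H : List Int) (out : Int) : Prop := out = solution_alt H
instance (H : List Int) (out : Int) : Decidable (Spec_solution H out) := by unfold Spec_solution; infer_instance

-- ===== CLAIM (what is proved, stated in full; the proofs are below) =====
def Claim_equal_solution : Prop := ∀ (H : List Int), Dom_solution H → Pre_solution H → Spec_solution H (solution H)


-- ===== LEMMAS AND PROOFS =====

/-- Max of a nonempty list as Python's running max; 0 on [] (unreachable under `Pre_`). -/
def lmax : List Int → Int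
  | [] => 0
  | x :: t => t.foldl max x

theorem foldl_max_shift (t : List Int) : ∀ a x : Int, t.foldl max (max a x) = max a (t.foldl max x) := by
  induction t with
  | nil => intro a x; rfl
  | cons y s ih =>
    intro a x
    simp only [List.foldl_cons, max_assoc]
    exact ih a (max x y)

theorem lmax_cons (h : Int) (t : List Int) (ht : t ≠ []) : lmax (h :: t) = max h (lmax t) := by
  obtain ⟨x, s, rfl⟩ := List.exists_cons_of_ne_nil ht
  show (x :: s).foldl max h = max h (s.foldl max x)
  simp only [List.foldl_cons]
  exact foldl_max_shift s h x

theorem lmax_append_singleton (l : List Int) (hl : l ≠ []) (x : Int) :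
    lmax (l ++ [x]) = max (lmax l) x := by
  obtain ⟨y, s, rfl⟩ := List.exists_cons_of_ne_nil hl
  show (s ++ [x]).foldl max y = max (s.foldl max y) x
  rw [List.foldl_append]
  rfl

theorem max_getD (l : List Int) (hl : l ≠ []) :
    (PySem.List.max? l (fun y => y)).getD 0 = lmax l := by
  obtain ⟨y, s, rfl⟩ := List.exists_cons_of_ne_nil hl
  rw [PySem.List.max?_id_cons]
  rfl

theorem if_max (x m : Int) : (if x > m then x else m) = max m x := by
  rw [max_def]
  split_ifs <;> omega

theorem if_lt_le (a b : Int) (hle : a ≤ b) : (if a < b then a else b) = a := by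
  split_ifs with hx
  · rfl
  · omega

theorem foldl_le_init (s : Int → Int → Int) (hs : ∀ c i, s c i ≤ c) :
    ∀ (L : List Int) (c : Int), L.foldl s c ≤ c := by
  intro L
  induction L with
  | nil => intro c; exact le_refl c
  | cons a t ih => intro c; exact le_trans (ih (s c a)) (hs c a)

/-- The backward pass of B builds exactly the suffix maxima (reversed), seeded with the last element. -/
theorem suf_fold (L : List Int) (hL : L ≠ []) : ∀ acc : List Int,
    L.reverse.foldl (fun (p : List Int × Int) x =>
        let m := if x > p.2 then x else p.2
        (p.1 ++ [m], m)) (acc, L.getLast hL)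
    = (acc ++ ((List.range L.length).map (fun i => lmax (L.drop i))).reverse, lmax L) := by
  induction L with
  | nil => exact absurd rfl hL
  | cons h t ih =>
    intro acc
    cases t with
    | nil => simp [lmax]
    | cons y s =>
      have ht : (y :: s) ≠ [] := List.cons_ne_nil y s
      rw [List.reverse_cons, List.foldl_append, List.getLast_cons ht, ih ht acc]
      simp only [List.foldl_cons, List.foldl_nil, if_max]
      have h2 : max (lmax (y :: s)) h = lmax (h :: y :: s) := by
        rw [lmax_cons h _ ht, max_comm]
      have h1 : (List.map (fun i => lmax ((h :: y :: s).drop i)) (List.range (h :: y :: s).length)).reverse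
          = (List.map (fun i => lmax ((y :: s).drop i)) (List.range (y :: s).length)).reverse
            ++ [lmax (h :: y :: s)] := by
        show (List.map _ (List.range ((y :: s).length + 1))).reverse = _
        rw [List.range_succ_eq_map, List.map_cons, List.map_map, List.reverse_cons]
        simp [Function.comp]
      rw [h2, h1, List.append_assoc]

theorem lmax_take_succ (H : List Int) (k : Nat) (h1 : 1 ≤ k) (h2 : k < H.length) :
    lmax (H.take (k + 1)) = max (lmax (H.take k)) H[k] := by
  rw [← List.take_concat_get h2, List.concat_eq_append, lmax_append_singleton]
  rw [List.ne_nil_iff_length_pos, List.length_take]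
  omega

theorem sfull_getD (H : List Int) (i : Int) (h0 : 0 ≤ i) (h1 : i < (H.length : Int)) :
    PySem.List.pyGetD ((List.range H.length).map (fun j => lmax (H.drop j))) i 0
      = lmax (H.drop i.toNat) := by
  have hlt : i < (((List.range H.length).map (fun j => lmax (H.drop j))).length : Int) := by
    simpa using h1
  rw [PySem.List.pyGetD_eq_getElem _ _ h0 hlt]
  simp

/-- The two loops keep B's running best equal to A's, and B's running prefix max equal to max(H[:i]). -/
theorem loop_eq (h : Int) (t : List Int) (c0 : Int) :
    ∀ (k : Nat), 1 ≤ k → k ≤ (h :: t).length →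
    (PySem.List.pyRange 1 (k : Int) 1).foldl
      (fun (q : Int × Int) i =>
        (if PySem.List.pyGetD (h :: t) (i - 1) 0 > q.1 then PySem.List.pyGetD (h :: t) (i - 1) 0 else q.1,
          if (if PySem.List.pyGetD (h :: t) (i - 1) 0 > q.1 then PySem.List.pyGetD (h :: t) (i - 1) 0 else q.1) * i +
              PySem.List.pyGetD ((List.range (h :: t).length).map (fun j => lmax ((h :: t).drop j))) i 0 *
                (((h :: t).length : Int) - i) < q.2 then
            (if PySem.List.pyGetD (h :: t) (i - 1) 0 > q.1 then PySem.List.pyGetD (h :: t) (i - 1) 0 else q.1) * i +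
              PySem.List.pyGetD ((List.range (h :: t).length).map (fun j => lmax ((h :: t).drop j))) i 0 *
                (((h :: t).length : Int) - i)
          else q.2)) (h, c0)
    = (lmax ((h :: t).take (max (k - 1) 1)),
       (PySem.List.pyRange 1 (k : Int) 1).foldl
        (fun curr i =>
          if (PySem.List.max? (PySem.List.slice (h :: t) (some 0) (some i)) (fun y => y)).getD 0 *
                ((PySem.List.slice (h :: t) (some 0) (some i)).length : Int) +
              (PySem.List.max? (PySem.List.slice (h :: t) (some i) none) (fun y => y)).getD 0 *
                ((PySem.List.slice (h :: t) (some i) none).length : Int) < curr then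
            (PySem.List.max? (PySem.List.slice (h :: t) (some 0) (some i)) (fun y => y)).getD 0 *
                ((PySem.List.slice (h :: t) (some 0) (some i)).length : Int) +
              (PySem.List.max? (PySem.List.slice (h :: t) (some i) none) (fun y => y)).getD 0 *
                ((PySem.List.slice (h :: t) (some i) none).length : Int)
          else curr) c0) := by
  intro k hk
  induction k, hk using Nat.le_induction with
  | base => intro _; rfl
  | succ k hk1 ih =>
    intro hk2
    have hkn : k < (h :: t).length := by omega
    have hcast : ((k + 1 : Nat) : Int) = (k : Int) + 1 := by push_cast; ring
    rw [hcast, PySem.List.pyRange_one_succ_right (by exact_mod_cast hk1),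
        List.foldl_append, List.foldl_append, ih (by omega)]
    simp only [List.foldl_cons, List.foldl_nil]
    -- the single step at i = k
    have hgd : PySem.List.pyGetD (h :: t) ((k : Int) - 1) 0 = (h :: t)[k - 1]'(by omega) := by
      have := PySem.List.pyGetD_eq_getElem (h :: t) (i := (k : Int) - 1) 0
        (by omega) (by omega)
      rw [this]
      congr 1
      omega
    have hpref : (max (lmax ((h :: t).take (max (k - 1) 1))) ((h :: t)[k - 1]'(by omega)))
        = lmax ((h :: t).take (max (k + 1 - 1) 1)) := by
      rcases Nat.eq_or_lt_of_le hk1 with h1 | h1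
      · simp [← h1, lmax]
      · have hk2' : 2 ≤ k := h1
        have : max (k - 1) 1 = k - 1 := by omega
        rw [this]
        have : max (k + 1 - 1) 1 = (k - 1) + 1 := by omega
        rw [this]
        exact (lmax_take_succ (h :: t) (k - 1) (by omega) (by omega)).symm
    have hsuf : PySem.List.pyGetD ((List.range (h :: t).length).map (fun j => lmax ((h :: t).drop j))) (k : Int) 0
        = lmax ((h :: t).drop k) := by
      rw [sfull_getD _ _ (by omega) (by exact_mod_cast hkn)]
      simp
    have hleft : PySem.List.slice (h :: t) (some 0) (some (k : Int)) = (h :: t).take k := by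
      simp [PySem.List.slice_to_natCast]
    have hright : PySem.List.slice (h :: t) (some (k : Int)) none = (h :: t).drop k := by
      exact PySem.List.slice_from_natCast _ k
    have hlnn : (h :: t).take k ≠ [] := by
      rw [List.ne_nil_iff_length_pos, List.length_take]; omega
    have hrnn : (h :: t).drop k ≠ [] := by
      rw [List.ne_nil_iff_length_pos, List.length_drop]; omega
    have hllen : (((h :: t).take k).length : Int) = (k : Int) := by
      rw [List.length_take]; omega
    have hrlen : (((h :: t).drop k).length : Int) = (((h :: t).length : Int)) - (k : Int) := by
      rw [List.length_drop]; omega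
    rw [hgd, if_max, hpref, hsuf, hleft, hright, max_getD _ hlnn, max_getD _ hrnn, hllen, hrlen]
    have hmk : max (k + 1 - 1) 1 = k := by omega
    rw [hmk]

-- ===== VERDICT (by name: the statement is the Claim_ definition above) =====
theorem solution_spec : Claim_equal_solution := by
  intro H _ hpre
  obtain ⟨h, t, rfl⟩ := List.exists_cons_of_ne_nil hpre
  have hne : (h :: t) ≠ [] := List.cons_ne_nil h t
  show solution (h :: t) = solution_alt (h :: t)
  simp only [solution, solution_alt, PySem.List.max?_id_cons, PySem.List.pyGet?_neg_one,
    List.getLast?_eq_some_getLast hne]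
  rw [suf_fold (h :: t) hne []]
  simp only [List.nil_append, List.reverse_reverse, PySem.List.pyGetD_zero_cons]
  have hb : PySem.List.pyGetD ((List.range (h :: t).length).map (fun i => lmax ((h :: t).drop i))) 0 0
      = List.foldl max h t := by
    rw [sfull_getD _ 0 (by omega) (by simp)]
    rfl
  rw [hb, loop_eq h t (List.foldl max h t * ((h :: t).length : Int)) (h :: t).length
    (by simp) (le_refl _)]
  rw [if_lt_le _ _ (foldl_le_init _ (by
    intro c i
    split_ifs with hx
    · exact le_of_lt hx
    · exact le_refl c) _ _)]
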